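-- pv_equiv track=rewrite | github.com/4raff/TwitterTrending | Twitter Trend.py | hitung_frekuensi_valid_iteratif
-- ===== SOURCE A (Python) =====
-- stopwords = {
--     'yang', 'untuk', 'dengan', 'di', 'ke', 'pada', 'adalah', 'itu', 'dan', 'tersebut',
--     'saya', 'kami', 'mereka', 'memiliki', 'menjadi', 'menyebabkan', 'menggunakan', 'untuk',
--     'seperti', 'mempunyai', 'menulis', 'berada', 'menghadapi', 'belajar', 'setiap',
--     'akan', 'sudah', 'sedang', 'dari', 'dalam', 'sebuah', 'hingga' , 'ini' , 'aku', 'hari' ,'kita', 'semoga', 'merasa', 'daerah', 'sangat', 'masyarakat', 'lebih', 'banyak', 'oleh', 'memberikan'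
-- }
--
-- def hitung_frekuensi_valid_iteratif(postingan_list):
--     frekuensi = {}
--     for postingan in postingan_list:
--         for kata in postingan.lower().split():  # Pecah menjadi kata-kata
--             kata = kata.strip('.,!?')  # Bersihkan tanda baca
--             if kata and kata not in stopwords:  # Abaikan stopwords dan kata kosong
--                 if kata not in frekuensi:
--                     frekuensi[kata] = 1
--                 else:
--                     frekuensi[kata] += 1
--     # Ambil hanya kata yang muncul lebih dari satu kali
--     return {kata: jumlah for kata, jumlah in frekuensi.items() if jumlah > 1}
-- ===== SOURCE B (Python) =====
-- stopwords = {
--     'yang', 'untuk', 'dengan', 'di', 'ke', 'pada', 'adalah', 'itu', 'dan', 'tersebut',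
--     'saya', 'kami', 'mereka', 'memiliki', 'menjadi', 'menyebabkan', 'menggunakan', 'untuk',
--     'seperti', 'mempunyai', 'menulis', 'berada', 'menghadapi', 'belajar', 'setiap',
--     'akan', 'sudah', 'sedang', 'dari', 'dalam', 'sebuah', 'hingga' , 'ini' , 'aku', 'hari' ,'kita', 'semoga', 'merasa', 'daerah', 'sangat', 'masyarakat', 'lebih', 'banyak', 'oleh', 'memberikan'
-- }
--
-- def hitung_frekuensi_valid_iteratif(postingan_list):
--     # one flat pass: collect every cleaned valid token, then tally by scanning
--     toks = []
--     for postingan in postingan_list: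
--         toks += [kata.strip('.,!?') for kata in postingan.lower().split()]
--     toks = [t for t in toks if t and t not in stopwords]
--     hasil = {}
--     for t in toks:
--         if t not in hasil:
--             c = toks.count(t)
--             if c > 1:
--                 hasil[t] = c
--     return hasil
-- ===== Notes on version B (the rewrite author's own statement) =====
-- stated objective: alternative
-- what changed: A counts incrementally in a dict while streaming nested tokens and then filters the dict; B first materialises the flat list of cleaned valid tokens and tallies each first occurrence with a count() scan over that list, trading the hash counter for a two-phase flatten-then-scan (quadratic in token count).
import Mathlib
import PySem

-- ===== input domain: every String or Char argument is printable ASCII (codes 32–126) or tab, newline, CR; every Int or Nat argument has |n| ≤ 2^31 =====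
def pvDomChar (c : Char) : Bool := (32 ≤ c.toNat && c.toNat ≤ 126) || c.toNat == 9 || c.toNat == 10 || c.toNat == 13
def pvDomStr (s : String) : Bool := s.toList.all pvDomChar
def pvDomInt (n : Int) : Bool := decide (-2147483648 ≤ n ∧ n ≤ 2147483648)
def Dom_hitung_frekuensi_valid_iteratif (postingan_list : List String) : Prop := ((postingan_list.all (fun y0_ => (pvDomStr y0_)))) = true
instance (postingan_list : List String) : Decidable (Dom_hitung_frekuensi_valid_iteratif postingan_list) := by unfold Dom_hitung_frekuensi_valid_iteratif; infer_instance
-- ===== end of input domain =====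

-- B replaces A's incremental hash-counting with one flat token list tallied by a count-scan per
-- first occurrence (alternative decomposition, same return value; A mutates nothing).

-- the module-level stopwords set (distinct elements, as Python's set literal dedups 'untuk')
def pvStopwords : List String :=
  ["yang", "untuk", "dengan", "di", "ke", "pada", "adalah", "itu", "dan", "tersebut",
   "saya", "kami", "mereka", "memiliki", "menjadi", "menyebabkan", "menggunakan",
   "seperti", "mempunyai", "menulis", "berada", "menghadapi", "belajar", "setiap",
   "akan", "sudah", "sedang", "dari", "dalam", "sebuah", "hingga", "ini", "aku", "hari",
   "kita", "semoga", "merasa", "daerah", "sangat", "masyarakat", "lebih", "banyak", "oleh", "memberikan"]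

-- ===== PORT A =====
def hitung_frekuensi_valid_iteratif (postingan_list : List String) : List (String × Int) :=
  let frekuensi : PySem.Dict String Int :=
    postingan_list.foldl (fun frekuensi postingan =>
      (PySem.Str.split₀ (PySem.Str.lower postingan)).foldl (fun frekuensi kata0 =>
        let kata := PySem.Str.stripChars kata0 ".,!?"
        if !(kata == "") && !(pvStopwords.contains kata) then
          if !(frekuensi.contains kata) then frekuensi.insert kata 1
          else frekuensi.insert kata (frekuensi.getD kata 0 + 1)
        else frekuensi) frekuensi) PySem.Dict.empty
  frekuensi.items.foldl (fun acc p => if p.2 > 1 then acc ++ [p] else acc) []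

-- ===== PORT B =====
def hitung_frekuensi_valid_iteratif_alt (postingan_list : List String) : List (String × Int) :=
  let toks0 : List String :=
    postingan_list.foldl (fun acc postingan =>
      acc ++ (PySem.Str.split₀ (PySem.Str.lower postingan)).map
               (fun kata => PySem.Str.stripChars kata ".,!?")) []
  let toks : List String := toks0.filter (fun t => !(t == "") && !(pvStopwords.contains t))
  let hasil : PySem.Dict String Int :=
    toks.foldl (fun hasil t =>
      if !(hasil.contains t) then
        let c : Int := (PySem.List.count toks t : Int)
        if c > 1 then hasil.insert t c else hasil
      else hasil) PySem.Dict.empty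
  hasil.items

-- ===== PRECONDITION & SPEC =====
def Spec_hitung_frekuensi_valid_iteratif (postingan_list : List String) (out : List (String × Int)) : Prop := out = hitung_frekuensi_valid_iteratif_alt postingan_list
instance (postingan_list : List String) (out : List (String × Int)) : Decidable (Spec_hitung_frekuensi_valid_iteratif postingan_list out) := by unfold Spec_hitung_frekuensi_valid_iteratif; infer_instance

-- ===== CLAIM (what is proved, stated in full; the proofs are below) =====
def Claim_equal_hitung_frekuensi_valid_iteratif : Prop := ∀ (postingan_list : List String), Dom_hitung_frekuensi_valid_iteratif postingan_list → Spec_hitung_frekuensi_valid_iteratif postingan_list (hitung_frekuensi_valid_iteratif postingan_list)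

-- ===== LEMMAS AND PROOFS =====


-- the cleaned valid token stream both programs process
def pvClean (kata : String) : String := PySem.Str.stripChars kata ".,!?"
def pvValid (t : String) : Bool := !(t == "") && !(pvStopwords.contains t)
def pvWords (p : String) : List String := (PySem.Str.split₀ (PySem.Str.lower p)).map pvClean
def pvToks (posts : List String) : List String := (posts.flatMap pvWords).filter pvValid

-- the common normal form of both outputs
def pvOut (posts : List String) : List (String × Int) :=
  ((PySem.Set.ofList (pvToks posts)).filter
      (fun k => decide ((List.count k (pvToks posts) : Int) > 1))).map
    (fun k => (k, (List.count k (pvToks posts) : Int)))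

-- A's counting branch, named so the nested loop can be rewritten
def pvCnt (d : PySem.Dict String Int) (kata : String) : PySem.Dict String Int :=
  if !(d.contains kata) then d.insert kata 1 else d.insert kata (d.getD kata 0 + 1)

-- A's nested counting loops build exactly Counter(pvToks posts)
lemma A_fold (posts : List String) :
    (posts.foldl (fun frekuensi postingan =>
      (PySem.Str.split₀ (PySem.Str.lower postingan)).foldl (fun frekuensi kata0 =>
        let kata := PySem.Str.stripChars kata0 ".,!?"
        if !(kata == "") && !(pvStopwords.contains kata) then
          if !(frekuensi.contains kata) then frekuensi.insert kata 1
          else frekuensi.insert kata (frekuensi.getD kata 0 + 1)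
        else frekuensi) frekuensi) (PySem.Dict.empty : PySem.Dict String Int))
    = PySem.Dict.counter (pvToks posts) := by
  have hstep : (fun (frekuensi : PySem.Dict String Int) (kata0 : String) =>
        let kata := PySem.Str.stripChars kata0 ".,!?"
        if !(kata == "") && !(pvStopwords.contains kata) then
          if !(frekuensi.contains kata) then frekuensi.insert kata 1
          else frekuensi.insert kata (frekuensi.getD kata 0 + 1)
        else frekuensi)
      = fun d kata0 => if pvValid (pvClean kata0) then pvCnt d (pvClean kata0) else d := rfl
  rw [hstep]
  rw [← List.foldl_flatMap]
  rw [← List.foldl_map (f := pvClean) (g := fun d k => if pvValid k then pvCnt d k else d)]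
  rw [List.map_flatMap]
  have hw : (fun a => List.map pvClean (PySem.Str.split₀ (PySem.Str.lower a))) = pvWords := rfl
  rw [hw]
  rw [PySem.List.foldl_if_eq_foldl_filter]
  have hcnt : pvCnt = fun d x => d.insert x (d.getD x 0 + 1) := by
    funext d x
    unfold pvCnt
    by_cases h : d.contains x
    · simp [h]
    · simp only [Bool.not_eq_true] at h
      simp [h, PySem.Dict.getD_of_not_contains d 0 h]
  rw [hcnt, PySem.Dict.foldl_insert_getD_add_one_eq_counter]
  rfl

lemma A_normal (posts : List String) :
    hitung_frekuensi_valid_iteratif posts = pvOut posts := by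
  unfold hitung_frekuensi_valid_iteratif
  rw [A_fold]
  rw [PySem.List.foldl_append_ite_eq_filter]
  rw [PySem.Dict.items_counter, List.filter_map]
  rw [List.nil_append]
  rfl

-- B's tally loop: invariant over the set s of tokens already seen (s has no duplicates)
lemma B_fold (cnt : String → Int) (l : List String) (s : List String) (hs : s.Nodup) :
    (l.foldl (fun d t =>
        if !(d.contains t) then (if cnt t > 1 then d.insert t (cnt t) else d) else d)
      (PySem.Dict.mk ((s.filter (fun k => decide (cnt k > 1))).map (fun k => (k, cnt k)))))
    = PySem.Dict.mk (((PySem.Set.update s l).filter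
        (fun k => decide (cnt k > 1))).map (fun k => (k, cnt k))) := by
  induction l generalizing s with
  | nil => rfl
  | cons t l ih =>
    have hupd : PySem.Set.update s (t :: l) = PySem.Set.update (PySem.Set.add s t) l := rfl
    rw [List.foldl_cons, hupd]
    have hcont : (PySem.Dict.mk ((s.filter (fun k => decide (cnt k > 1))).map
        (fun k => (k, cnt k)))).contains t = decide (t ∈ s ∧ cnt t > 1) := by
      rw [Bool.eq_iff_iff]
      simp [PySem.Dict.contains_mk]
    by_cases ht : t ∈ s
    · have hadd : PySem.Set.add s t = s := by
        simp [PySem.Set.add, PySem.Set.contains, ht]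
      by_cases hP : cnt t > 1
      · rw [if_neg (by rw [hcont]; simp [ht, hP]), hadd]
        exact ih s hs
      · rw [if_pos (by rw [hcont]; simp [ht, hP]), if_neg hP, hadd]
        exact ih s hs
    · have hadd : PySem.Set.add s t = s ++ [t] := by
        simp [PySem.Set.add, PySem.Set.contains, ht]
      have hns : (s ++ [t]).Nodup := by
        rw [List.nodup_append]
        refine ⟨hs, List.nodup_singleton t, ?_⟩
        intro a ha b hb
        exact fun h => ht ((h.trans (List.mem_singleton.mp hb)) ▸ ha)
      rw [if_pos (by rw [hcont]; simp [ht]), hadd]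
      by_cases hP : cnt t > 1
      · rw [if_pos hP]
        have hfresh : (PySem.Dict.mk ((s.filter (fun k => decide (cnt k > 1))).map
            (fun k => (k, cnt k)))).contains t = false := by
          rw [hcont]; simp [ht]
        have hins : (PySem.Dict.mk ((s.filter (fun k => decide (cnt k > 1))).map
              (fun k => (k, cnt k)))).insert t (cnt t)
            = PySem.Dict.mk (((s ++ [t]).filter (fun k => decide (cnt k > 1))).map
              (fun k => (k, cnt k))) := by
          apply PySem.Dict.ext
          rw [PySem.Dict.items_insert_of_not_contains _ (cnt t) hfresh]
          simp [List.filter_append, hP]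
        rw [hins]
        exact ih (s ++ [t]) hns
      · rw [if_neg hP]
        have hfe : ((s ++ [t]).filter (fun k => decide (cnt k > 1))) =
            (s.filter (fun k => decide (cnt k > 1))) := by
          simp [List.filter_append, hP]
        have hih := ih (s ++ [t]) hns
        rw [hfe] at hih
        exact hih

lemma B_normal (posts : List String) :
    hitung_frekuensi_valid_iteratif_alt posts = pvOut posts := by
  unfold hitung_frekuensi_valid_iteratif_alt
  rw [PySem.List.foldl_append_eq_flatMap, List.nil_append]
  rw [show (fun postingan => (PySem.Str.split₀ (PySem.Str.lower postingan)).map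
        (fun kata => PySem.Str.stripChars kata ".,!?")) = pvWords from rfl]
  rw [show (fun t => !(t == "") && !(pvStopwords.contains t)) = pvValid from rfl]
  show (List.foldl (fun (hasil : PySem.Dict String Int) t =>
      if !(hasil.contains t) then
        (if ((PySem.List.count (pvToks posts) t : Int)) > 1 then
          hasil.insert t ((PySem.List.count (pvToks posts) t : Int)) else hasil)
      else hasil) PySem.Dict.empty (pvToks posts)).items = pvOut posts
  have hB := B_fold (fun t => ((PySem.List.count (pvToks posts) t : Int)))
    (pvToks posts) [] List.nodup_nil
  simp only [List.filter_nil, List.map_nil] at hB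
  rw [show (PySem.Dict.empty : PySem.Dict String Int) = PySem.Dict.mk [] from rfl, hB]
  simp only [PySem.List.count_eq]
  rfl
-- ===== VERDICT (by name: the statement is the Claim_ definition above) =====
theorem hitung_frekuensi_valid_iteratif_spec : Claim_equal_hitung_frekuensi_valid_iteratif := by
  intro posts _
  unfold Spec_hitung_frekuensi_valid_iteratif
  rw [A_normal, B_normal]
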